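-- pv_equiv track=rewrite | github.com/henryrose/thriving-together | scraper/scrape.py | parse_srcset
-- ===== SOURCE A (Python) =====
-- def parse_srcset(srcset: str) -> list[tuple[str, str]]:
--     """Parse an HTML srcset attribute into [(url, descriptor), ...] pairs.
--
--     A naive ``srcset.split(",")`` is wrong because Wix's image URLs contain
--     commas in the path (e.g. ``/v1/fill/w_640,h_480,al_c/img.jpg``). Instead
--     we tokenize on whitespace — URLs and descriptors never contain whitespace,
--     and the entry separator is ", " or ",\\n" etc.; the trailing comma always
--     appears on the descriptor token (or, if there is no descriptor, on the
--     URL token), never embedded in a Wix transform URL.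
--     """
--     entries: list[tuple[str, str]] = []
--     cur_url: str | None = None
--     cur_desc: list[str] = []
--     for tok in srcset.split():
--         ends_entry = tok.endswith(",")
--         if ends_entry:
--             tok = tok[:-1]
--         if tok:
--             if cur_url is None:
--                 cur_url = tok
--             else:
--                 cur_desc.append(tok)
--         if ends_entry and cur_url is not None:
--             entries.append((cur_url, " ".join(cur_desc)))
--             cur_url = None
--             cur_desc = []
--     if cur_url is not None:
--         entries.append((cur_url, " ".join(cur_desc)))
--     return entries
-- ===== SOURCE B (Python) =====
-- def parse_srcset(srcset: str) -> list[tuple[str, str]]: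
--     """Two-stage re-implementation: first cut the string into entry chunks at
--     every comma that is followed by whitespace or end-of-string (commas inside
--     Wix URLs are followed by non-space, so they stay put), then map each
--     chunk through str.split() and emit (first word, rest joined)."""
--     chunks: list[str] = []
--     cur: list[str] = []
--     n = len(srcset)
--     for i, ch in enumerate(srcset):
--         if ch == "," and (i + 1 == n or srcset[i + 1].isspace()):
--             chunks.append("".join(cur))
--             cur = []
--         else:
--             cur.append(ch)
--     chunks.append("".join(cur))
--     entries: list[tuple[str, str]] = []
--     for chunk in chunks:
--         parts = chunk.split()
--         if parts:
--             entries.append((parts[0], " ".join(parts[1:])))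
--     return entries
-- ===== Notes on version B (the rewrite author's own statement) =====
-- stated objective: alternative
-- what changed: Replaces A's single-pass token state machine (whitespace tokens with trailing-comma bookkeeping carried across entries) by a two-stage pass: first split the string into entry chunks at each comma that is followed by whitespace or end-of-string, then map every chunk independently through str.split() to (first word, rest joined).
import Mathlib
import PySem

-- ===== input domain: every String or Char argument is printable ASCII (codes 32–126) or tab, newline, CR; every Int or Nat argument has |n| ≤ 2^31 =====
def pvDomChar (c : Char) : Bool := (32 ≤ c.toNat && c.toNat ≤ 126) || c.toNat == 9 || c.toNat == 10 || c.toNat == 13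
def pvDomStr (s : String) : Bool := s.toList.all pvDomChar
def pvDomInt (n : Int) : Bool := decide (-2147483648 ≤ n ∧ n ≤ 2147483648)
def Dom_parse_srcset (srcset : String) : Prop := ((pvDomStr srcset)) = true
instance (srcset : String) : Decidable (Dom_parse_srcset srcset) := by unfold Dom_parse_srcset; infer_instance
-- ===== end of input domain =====

-- B replaces A's streaming token state machine by a two-stage pass (split into entry
-- chunks at each comma followed by whitespace or end-of-string, then map each chunk);
-- same cost, different decomposition ("alternative").

-- ===== PORT A =====
-- A's loop body: state is (entries, cur_url, cur_desc); strings handled on the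
-- .toList side (PySem.Chars.split₀ = str.split(), Chars.join = str.join, exact).
def pvStepA (st : List (String × String) × Option (List Char) × List (List Char))
    (tok : List Char) :
    List (String × String) × Option (List Char) × List (List Char) :=
  let endsEntry := PySem.Chars.endswith tok [',']
  let tok := if endsEntry then PySem.List.slice tok none (some (-1)) else tok
  let (entries, curUrl, curDesc) := st
  let (curUrl, curDesc) :=
    if tok.isEmpty then (curUrl, curDesc)
    else
      match curUrl with
      | none => (some tok, curDesc)
      | some u => (some u, curDesc ++ [tok])
  if endsEntry then
    match curUrl with
    | some u => (entries ++ [(String.ofList u, String.ofList (PySem.Chars.join [' '] curDesc))],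
                 none, ([] : List (List Char)))
    | none => (entries, curUrl, curDesc)
  else (entries, curUrl, curDesc)

def parse_srcset (srcset : String) : List (String × String) :=
  match (PySem.Chars.split₀ srcset.toList).foldl pvStepA ([], none, []) with
  | (entries, some u, curDesc) =>
      entries ++ [(String.ofList u, String.ofList (PySem.Chars.join [' '] curDesc))]
  | (entries, none, _) => entries

-- ===== PORT B =====
-- Source B lookahead test: `i + 1 == n or srcset[i+1].isspace()` — the remaining
-- characters after position i are exactly `rest` here.
def pvSplitHere : List Char → Bool
  | [] => true
  | c :: _ => PySem.Chars.isspace c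

-- Source B's first loop: build the chunk list (cur = the chunk being accumulated).
def pvChunksGo : List Char → List Char → List (List Char) → List (List Char)
  | [], cur, chunks => chunks ++ [cur]
  | c :: rest, cur, chunks =>
    if c = ',' ∧ pvSplitHere rest then pvChunksGo rest [] (chunks ++ [cur])
    else pvChunksGo rest (cur ++ [c]) chunks

-- Source B's second loop body: parts = chunk.split(); emit (parts[0], " ".join(parts[1:])).
def pvStepB (entries : List (String × String)) (chunk : List Char) : List (String × String) :=
  match PySem.Chars.split₀ chunk with
  | [] => entries
  | p :: ps => entries ++ [(String.ofList p, String.ofList (PySem.Chars.join [' '] ps))]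

def parse_srcset_alt (srcset : String) : List (String × String) :=
  (pvChunksGo srcset.toList [] []).foldl pvStepB []

-- ===== PRECONDITION & SPEC =====
def Spec_parse_srcset (srcset : String) (out : List (String × String)) : Prop := out = parse_srcset_alt srcset
instance (srcset : String) (out : List (String × String)) : Decidable (Spec_parse_srcset srcset out) := by unfold Spec_parse_srcset; infer_instance

-- ===== CLAIM (what is proved, stated in full; the proofs are below) =====
def Claim_equal_parse_srcset : Prop := ∀ (srcset : String), Dom_parse_srcset srcset → Spec_parse_srcset srcset (parse_srcset srcset)

-- ===== LEMMAS AND PROOFS =====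

-- `nsp` = "not whitespace", the predicate str.split() scans with.
def nsp (c : Char) : Bool := !PySem.Chars.isspace c

-- Clean structural form of Source B's chunk split (proof-side only).
def chunksE : List Char → List (List Char)
  | [] => [[]]
  | c :: rest =>
    if c = ',' ∧ pvSplitHere rest then [] :: chunksE rest
    else
      match chunksE rest with
      | [] => [[c]]
      | h :: t => (c :: h) :: t

-- Flush + emit abstractions used to state the main invariant.
def pvFlush (st : List (String × String) × Option (List Char) × List (List Char)) :
    List (String × String) :=
  match st with
  | (entries, some u, ds) => entries ++ [(String.ofList u, String.ofList (PySem.Chars.join [' '] ds))]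
  | (entries, none, _) => entries

def pvEmit1 (entries : List (String × String)) (url : Option (List Char))
    (ds : List (List Char)) (chunk : List Char) : List (String × String) :=
  match url with
  | none => pvStepB entries chunk
  | some u =>
      entries ++ [(String.ofList u,
        String.ofList (PySem.Chars.join [' '] (ds ++ PySem.Chars.split₀ chunk)))]

theorem chunksE_ne_nil (cs : List Char) : chunksE cs ≠ [] := by
  cases cs with
  | nil => simp [chunksE]
  | cons c rest =>
    unfold chunksE
    split
    · simp
    · cases chunksE rest <;> simp

theorem chunksE_comma {r : List Char} (hr : pvSplitHere r = true) :
    chunksE (',' :: r) = [] :: chunksE r := by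
  conv_lhs => unfold chunksE
  rw [if_pos ⟨rfl, hr⟩]

theorem chunksGo_spec (cs : List Char) : ∀ cur chunks,
    pvChunksGo cs cur chunks =
      chunks ++ (match chunksE cs with
                 | [] => []
                 | h :: t => (cur ++ h) :: t) := by
  induction cs with
  | nil => intro cur chunks; simp [pvChunksGo, chunksE]
  | cons c rest ih =>
    intro cur chunks
    unfold pvChunksGo chunksE
    split
    · rw [ih]
      rcases hE : chunksE rest with _ | ⟨h, t⟩
      · exact absurd hE (chunksE_ne_nil rest)
      · simp
    · rw [ih]
      rcases hE : chunksE rest with _ | ⟨h, t⟩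
      · exact absurd hE (chunksE_ne_nil rest)
      · simp

theorem alt_eq_chunksE (s : String) :
    parse_srcset_alt s = (chunksE s.toList).foldl pvStepB [] := by
  unfold parse_srcset_alt
  rw [chunksGo_spec]
  rcases hE : chunksE s.toList with _ | ⟨h, t⟩
  · exact absurd hE (chunksE_ne_nil _)
  · simp

-- ---- split₀ recursion equations ----

theorem go_acc (cs : List Char) : ∀ cur acc,
    PySem.Chars.split₀.go cs cur acc = acc.reverse ++ PySem.Chars.split₀.go cs cur [] := by
  induction cs with
  | nil =>
    intro cur acc
    unfold PySem.Chars.split₀.go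
    by_cases h : cur = [] <;> simp [h]
  | cons c rest ih =>
    intro cur acc
    unfold PySem.Chars.split₀.go
    by_cases hsp : PySem.Chars.isspace c = true
    · by_cases h : cur = []
      · simp only [hsp, if_true, List.isEmpty_iff, h]
        exact ih [] acc
      · simp only [hsp, if_true, List.isEmpty_iff, h, if_false]
        rw [ih [] (cur.reverse :: acc), ih [] [cur.reverse]]
        simp
    · simp only [hsp]
      rw [ih (c :: cur) acc]
      simp

theorem split₀_nil : PySem.Chars.split₀ [] = [] := by
  simp [PySem.Chars.split₀, PySem.Chars.split₀.go]

theorem split₀_cons_space {c : Char} (rest : List Char) (h : PySem.Chars.isspace c = true) :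
    PySem.Chars.split₀ (c :: rest) = PySem.Chars.split₀ rest := by
  conv_lhs => unfold PySem.Chars.split₀ PySem.Chars.split₀.go
  simp only [h, if_true, List.isEmpty_iff]
  rfl

theorem go_cur (cs : List Char) : ∀ cur, cur ≠ [] →
    PySem.Chars.split₀.go cs cur [] =
      (cur.reverse ++ cs.takeWhile nsp) :: PySem.Chars.split₀ (cs.dropWhile nsp) := by
  induction cs with
  | nil =>
    intro cur h
    unfold PySem.Chars.split₀.go
    simp [h, PySem.Chars.split₀, PySem.Chars.split₀.go]
  | cons c rest ih =>
    intro cur h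
    unfold PySem.Chars.split₀.go
    by_cases hsp : PySem.Chars.isspace c = true
    · simp only [hsp, if_true, List.isEmpty_iff, h, if_false]
      rw [go_acc]
      have hd : List.dropWhile nsp (c :: rest) = c :: rest := by
        simp [nsp, hsp]
      have ht : List.takeWhile nsp (c :: rest) = [] := by
        simp [nsp, hsp]
      rw [ht, hd, split₀_cons_space rest hsp]
      simp [PySem.Chars.split₀]
    · simp only [hsp]
      rw [ih (c :: cur) (by simp)]
      simp [List.takeWhile, List.dropWhile, nsp, hsp]

theorem split₀_cons_nsp {c : Char} (rest : List Char) (h : PySem.Chars.isspace c = false) :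
    PySem.Chars.split₀ (c :: rest) =
      (c :: rest.takeWhile nsp) :: PySem.Chars.split₀ (rest.dropWhile nsp) := by
  conv_lhs => unfold PySem.Chars.split₀ PySem.Chars.split₀.go
  simp only [h, Bool.false_eq_true, if_false]
  rw [go_cur rest [c] (by simp)]
  simp

theorem takeWhile_nil_of_splitHere {l : List Char} (h : pvSplitHere l = true) :
    l.takeWhile nsp = [] ∧ l.dropWhile nsp = l := by
  cases l with
  | nil => simp
  | cons c rest =>
    simp only [pvSplitHere] at h
    simp [List.takeWhile, List.dropWhile, nsp, h]

theorem splitHere_of_takeWhile_nil {l : List Char} (h : l.takeWhile nsp = []) :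
    pvSplitHere l = true := by
  cases l with
  | nil => rfl
  | cons c rest =>
    simp only [List.takeWhile] at h
    cases hn : nsp c with
    | true => rw [hn] at h; simp at h
    | false => simp only [pvSplitHere]; simpa [nsp] using hn

theorem splitHere_dropWhile (l : List Char) : pvSplitHere (l.dropWhile nsp) = true := by
  induction l with
  | nil => rfl
  | cons c rest ih =>
    by_cases h : nsp c = true
    · simpa [List.dropWhile, h] using ih
    · simp only [List.dropWhile, h]
      simp only [pvSplitHere]
      simpa [nsp] using h

theorem split₀_append_break {t h : List Char} (hne : t ≠ [])
    (hns : ∀ x ∈ t, PySem.Chars.isspace x = false)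
    (hsh : pvSplitHere h = true) :
    PySem.Chars.split₀ (t ++ h) = t :: PySem.Chars.split₀ h := by
  obtain ⟨c, t', rfl⟩ := List.exists_cons_of_ne_nil hne
  rw [List.cons_append, split₀_cons_nsp (t' ++ h) (hns c (by simp))]
  have hns' : ∀ x ∈ t', nsp x = true := by
    intro x hx; simp [nsp, hns x (List.mem_cons_of_mem _ hx)]
  obtain ⟨htk, hdk⟩ := takeWhile_nil_of_splitHere hsh
  rw [List.takeWhile_append_of_pos hns', List.dropWhile_append_of_pos hns', htk, hdk]
  simp

theorem split₀_all_nsp {t : List Char} (hne : t ≠ [])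
    (hns : ∀ x ∈ t, PySem.Chars.isspace x = false) :
    PySem.Chars.split₀ t = [t] := by
  have := split₀_append_break (h := []) hne hns rfl
  simpa [split₀_nil] using this

theorem chunksE_glue {xs : List Char} (v : List Char) (h : List Char) (tl : List (List Char))
    (hne : xs ≠ []) (hns : ∀ x ∈ xs, PySem.Chars.isspace x = false)
    (hl : xs.getLast? = some ',' → pvSplitHere v = false)
    (hv : chunksE v = h :: tl) :
    chunksE (xs ++ v) = (xs ++ h) :: tl := by
  induction xs with
  | nil => exact absurd rfl hne
  | cons x xs' ih =>
    cases xs' with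
    | nil =>
      simp only [List.cons_append, List.nil_append]
      unfold chunksE
      have hcond : ¬ (x = ',' ∧ pvSplitHere v = true) := by
        rintro ⟨rfl, hsv⟩
        have := hl (by simp)
        rw [this] at hsv; exact Bool.false_ne_true hsv
      simp only [if_neg hcond]
      rw [hv]
    | cons y ys =>
      have hrec : chunksE ((y :: ys) ++ v) = ((y :: ys) ++ h) :: tl := by
        refine ih (by simp) (fun z hz => hns z (List.mem_cons_of_mem _ hz)) ?_
        intro hlast
        refine hl ?_
        rw [List.getLast?_cons_cons]
        exact hlast
      simp only [List.cons_append]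
      unfold chunksE
      have hy : pvSplitHere (y :: (ys ++ v)) = false := by
        simp only [pvSplitHere]
        exact hns y (by simp)
      have hcond : ¬ (x = ',' ∧ pvSplitHere (y :: (ys ++ v)) = true) := by
        rintro ⟨_, hsv⟩; rw [hy] at hsv; exact Bool.false_ne_true hsv
      simp only [if_neg hcond]
      simp only [List.cons_append] at hrec
      rw [hrec]

-- ---- pvStepA evaluation lemmas ----

theorem endswith_concat_comma (l : List Char) :
    PySem.Chars.endswith (l ++ [',']) [','] = true := by
  rw [PySem.Chars.endswith_iff]; exact ⟨l, rfl⟩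

theorem endswith_comma_false {l : List Char} (h : l.getLast? ≠ some ',') :
    PySem.Chars.endswith l [','] = false := by
  by_contra hc
  rw [Bool.not_eq_false, PySem.Chars.endswith_iff] at hc
  obtain ⟨u, hu⟩ := hc
  exact h (by rw [← hu]; simp)

theorem slice_drop_comma (l : List Char) :
    PySem.List.slice (l ++ [',']) none (some (-1)) = l := by
  simp [PySem.List.slice, PySem.List.clampIdx]

theorem stepA_comma (entries : List (String × String)) (url : Option (List Char))
    (ds : List (List Char)) {dl : List Char} (hne : dl ≠ []) :
    pvStepA (entries, url, ds) (dl ++ [',']) =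
      (match url with
       | none => entries ++ [(String.ofList dl, String.ofList (PySem.Chars.join [' '] ds))]
       | some u => entries ++ [(String.ofList u, String.ofList (PySem.Chars.join [' '] (ds ++ [dl])))],
       none, ([] : List (List Char))) := by
  unfold pvStepA
  rw [endswith_concat_comma]
  simp only [if_true, slice_drop_comma, List.isEmpty_iff, hne]
  cases url <;> simp

theorem stepA_comma_tok (entries : List (String × String)) (url : Option (List Char))
    (ds : List (List Char)) :
    pvStepA (entries, url, ds) [','] =
      (match url with
       | none => (entries, none, ds)
       | some u => (entries ++ [(String.ofList u, String.ofList (PySem.Chars.join [' '] ds))],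
                    none, ([] : List (List Char)))) := by
  unfold pvStepA
  have he : PySem.Chars.endswith [','] [','] = true := by decide
  have hs : PySem.List.slice [','] none (some (-1)) = ([] : List Char) := by decide
  rw [he, hs]
  cases url <;> simp

theorem stepA_plain (entries : List (String × String)) (url : Option (List Char))
    (ds : List (List Char)) {t : List Char} (hne : t ≠ []) (hlast : t.getLast? ≠ some ',') :
    pvStepA (entries, url, ds) t =
      (match url with
       | none => (entries, some t, ds)
       | some u => (entries, some u, ds ++ [t])) := by
  unfold pvStepA
  rw [endswith_comma_false hlast]
  simp only [Bool.false_eq_true, if_false, List.isEmpty_iff, hne]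
  cases url <;> simp

-- ---- the main invariant ----

theorem chunksE_head_splitHere {r : List Char} (hr : pvSplitHere r = true)
    {h : List Char} {tl : List (List Char)} (hv : chunksE r = h :: tl) :
    pvSplitHere h = true := by
  cases r with
  | nil => simp [chunksE] at hv; rw [hv.1]; rfl
  | cons d rest =>
    simp only [pvSplitHere] at hr
    unfold chunksE at hv
    have hcond : ¬ (d = ',' ∧ pvSplitHere rest = true) := by
      rintro ⟨rfl, _⟩
      have : PySem.Chars.isspace ',' = false := by decide
      rw [this] at hr; exact Bool.false_ne_true hr
    rw [if_neg hcond] at hv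
    rcases hE : chunksE rest with _ | ⟨h', t'⟩
    · exact absurd hE (chunksE_ne_nil rest)
    · rw [hE] at hv
      injection hv with h1 _
      rw [← h1]
      simpa [pvSplitHere] using hr

theorem pvEmit1_space {c : Char} (hsp : PySem.Chars.isspace c = true)
    (entries : List (String × String)) (url : Option (List Char)) (ds : List (List Char))
    (h : List Char) :
    pvEmit1 entries url ds (c :: h) = pvEmit1 entries url ds h := by
  unfold pvEmit1 pvStepB
  rw [split₀_cons_space h hsp]

theorem mg (n : Nat) : ∀ (cs : List Char), cs.length ≤ n →
    ∀ (entries : List (String × String)) (url : Option (List Char)) (ds : List (List Char))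
      (h : List Char) (tl : List (List Char)),
      (url = none → ds = []) → chunksE cs = h :: tl →
      pvFlush ((PySem.Chars.split₀ cs).foldl pvStepA (entries, url, ds)) =
        tl.foldl pvStepB (pvEmit1 entries url ds h) := by
  induction n with
  | zero =>
    intro cs hlen entries url ds h tl hinv hch
    have hnil : cs = [] := List.eq_nil_of_length_eq_zero (Nat.le_zero.mp hlen)
    subst hnil
    simp only [chunksE] at hch
    obtain ⟨h1, h2⟩ : ([] : List Char) = h ∧ ([] : List (List Char)) = tl := by
      injection hch with h1 h2; exact ⟨h1, h2⟩
    rw [← h1, ← h2, split₀_nil]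
    cases url with
    | none => simp [pvFlush, pvEmit1, pvStepB, split₀_nil]
    | some u => simp [pvFlush, pvEmit1, split₀_nil]
  | succ n ih =>
    intro cs hlen entries url ds h tl hinv hch
    cases cs with
    | nil =>
      simp only [chunksE] at hch
      obtain ⟨h1, h2⟩ : ([] : List Char) = h ∧ ([] : List (List Char)) = tl := by
        injection hch with h1 h2; exact ⟨h1, h2⟩
      rw [← h1, ← h2, split₀_nil]
      cases url with
      | none => simp [pvFlush, pvEmit1, pvStepB, split₀_nil]
      | some u => simp [pvFlush, pvEmit1, split₀_nil]
    | cons c rest =>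
      have hlen' : rest.length ≤ n := by simpa using hlen
      by_cases hsp : PySem.Chars.isspace c = true
      · -- whitespace character: both sides just skip it
        have hcne : ¬ (c = ',' ∧ pvSplitHere rest = true) := by
          rintro ⟨rfl, _⟩
          have : PySem.Chars.isspace ',' = false := by decide
          rw [this] at hsp; exact Bool.false_ne_true hsp
        rcases hE : chunksE rest with _ | ⟨h', t'⟩
        · exact absurd hE (chunksE_ne_nil rest)
        · unfold chunksE at hch
          rw [if_neg hcne, hE] at hch
          obtain ⟨h1, h2⟩ : c :: h' = h ∧ t' = tl := by
            injection hch with h1 h2; exact ⟨h1, h2⟩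
          rw [← h1, ← h2, split₀_cons_space rest hsp, pvEmit1_space hsp]
          exact ih rest hlen' entries url ds h' t' hinv hE
      · -- non-space character
        have hsp' : PySem.Chars.isspace c = false := by
          exact Bool.not_eq_true _ ▸ (by simpa using hsp)
        by_cases hcs : c = ',' ∧ pvSplitHere rest = true
        · -- a lone separating comma: its token is [','], its chunk is []
          obtain ⟨rfl, hsh⟩ := hcs
          obtain ⟨htk, hdk⟩ := takeWhile_nil_of_splitHere hsh
          rw [split₀_cons_nsp rest hsp', htk, hdk]
          rw [chunksE_comma hsh] at hch
          obtain ⟨hh, htl⟩ : ([] : List Char) = h ∧ chunksE rest = tl := by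
            injection hch with h1 h2; exact ⟨h1, h2⟩
          rw [← hh]
          rcases hE : chunksE rest with _ | ⟨h', t'⟩
          · exact absurd hE (chunksE_ne_nil rest)
          · rw [List.foldl_cons, stepA_comma_tok]
            cases url with
            | none =>
              have hds : ds = [] := hinv rfl
              subst hds
              rw [← htl, hE, List.foldl_cons]
              have hbase : pvStepB (pvEmit1 entries none [] []) h' = pvStepB entries h' := by
                simp [pvEmit1, pvStepB, split₀_nil]
              rw [hbase]
              have := ih rest hlen' entries none [] h' t' (fun _ => rfl) hE
              simpa [pvEmit1] using this
            | some u =>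
              rw [← htl, hE, List.foldl_cons]
              have hbase :
                  pvStepB (pvEmit1 entries (some u) ds []) h' =
                    pvStepB (entries ++ [(String.ofList u, String.ofList (PySem.Chars.join [' '] ds))]) h' := by
                simp [pvEmit1, split₀_nil]
              rw [hbase]
              have := ih rest hlen'
                (entries ++ [(String.ofList u, String.ofList (PySem.Chars.join [' '] ds))])
                none [] h' t' (fun _ => rfl) hE
              simpa [pvEmit1] using this
        · -- a real token t = c :: takeWhile nsp rest
          rw [split₀_cons_nsp rest hsp']
          have hrest : rest = rest.takeWhile nsp ++ rest.dropWhile nsp :=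
            (List.takeWhile_append_dropWhile).symm
          have hnst : ∀ x ∈ c :: rest.takeWhile nsp, PySem.Chars.isspace x = false := by
            intro x hx
            rcases List.mem_cons.mp hx with rfl | hx'
            · exact hsp'
            · have := List.mem_takeWhile_imp hx'
              simpa [nsp] using this
          have hshr : pvSplitHere (rest.dropWhile nsp) = true := splitHere_dropWhile rest
          have hcs_eq : c :: rest = (c :: rest.takeWhile nsp) ++ rest.dropWhile nsp := by
            rw [List.cons_append]; exact congrArg (c :: ·) hrest
          rcases hE : chunksE (rest.dropWhile nsp) with _ | ⟨h', t'⟩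
          · exact absurd hE (chunksE_ne_nil _)
          by_cases hlast : (c :: rest.takeWhile nsp).getLast? = some ','
          · -- token carries the separating comma
            obtain ⟨dl, hdl⟩ := List.getLast?_eq_some_iff.mp hlast
            have hdlne : dl ≠ [] := by
              rintro rfl
              simp only [List.nil_append] at hdl
              have hc' : c = ',' ∧ rest.takeWhile nsp = [] := by
                injection hdl with h1 h2; exact ⟨h1, h2⟩
              exact hcs ⟨hc'.1, splitHere_of_takeWhile_nil hc'.2⟩
            have hnsdl : ∀ x ∈ dl, PySem.Chars.isspace x = false := by
              intro x hx
              exact hnst x (by rw [hdl]; exact List.mem_append_left _ hx)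
            have hchE : chunksE (c :: rest) = dl :: chunksE (rest.dropWhile nsp) := by
              have hmid := chunksE_comma (r := rest.dropWhile nsp) hshr
              have hglue := chunksE_glue (',' :: rest.dropWhile nsp) []
                (chunksE (rest.dropWhile nsp)) hdlne hnsdl
                (fun _ => by simp [pvSplitHere]; decide) hmid
              have heq : c :: rest = dl ++ (',' :: rest.dropWhile nsp) := by
                rw [hcs_eq, hdl, List.append_assoc]; rfl
              rw [heq, hglue]
              simp
            rw [hchE, hE] at hch
            obtain ⟨hh, htl⟩ : dl = h ∧ h' :: t' = tl := by
              injection hch with h1 h2; exact ⟨h1, h2⟩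
            rw [← hh, ← htl, List.foldl_cons, hdl, stepA_comma entries url ds hdlne]
            have hlr : (rest.dropWhile nsp).length ≤ n :=
              le_trans (List.length_dropWhile_le _ _) hlen'
            have hsdl : PySem.Chars.split₀ dl = [dl] := split₀_all_nsp hdlne hnsdl
            cases url with
            | none =>
              have hds : ds = [] := hinv rfl
              subst hds
              have := ih (rest.dropWhile nsp) hlr
                (entries ++ [(String.ofList dl, String.ofList (PySem.Chars.join [' '] []))])
                none [] h' t' (fun _ => rfl) hE
              rw [List.foldl_cons]
              have hbase : pvStepB (pvEmit1 entries none [] dl) h' =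
                  pvStepB (entries ++ [(String.ofList dl, String.ofList (PySem.Chars.join [' '] []))]) h' := by
                simp [pvEmit1, pvStepB, hsdl]
              rw [hbase]
              simpa [pvEmit1] using this
            | some u =>
              have := ih (rest.dropWhile nsp) hlr
                (entries ++ [(String.ofList u, String.ofList (PySem.Chars.join [' '] (ds ++ [dl])))])
                none [] h' t' (fun _ => rfl) hE
              rw [List.foldl_cons]
              have hbase : pvStepB (pvEmit1 entries (some u) ds dl) h' =
                  pvStepB (entries ++ [(String.ofList u, String.ofList (PySem.Chars.join [' '] (ds ++ [dl])))]) h' := by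
                simp [pvEmit1, hsdl]
              rw [hbase]
              simpa [pvEmit1] using this
          · -- plain token, no separating comma at its end
            have htne : (c :: rest.takeWhile nsp) ≠ [] := by simp
            have hchE : chunksE (c :: rest) =
                ((c :: rest.takeWhile nsp) ++ h') :: t' := by
              have := chunksE_glue (rest.dropWhile nsp) h' t' htne hnst
                (fun hh => absurd hh hlast) hE
              rw [hcs_eq]
              simpa using this
            rw [hchE] at hch
            obtain ⟨hh, htl⟩ : (c :: rest.takeWhile nsp) ++ h' = h ∧ t' = tl := by
              injection hch with h1 h2; exact ⟨h1, h2⟩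
            rw [← hh, ← htl]
            have hsh' : pvSplitHere h' = true := chunksE_head_splitHere hshr hE
            have hsplit : PySem.Chars.split₀ ((c :: rest.takeWhile nsp) ++ h') =
                (c :: rest.takeWhile nsp) :: PySem.Chars.split₀ h' :=
              split₀_append_break htne hnst hsh'
            rw [List.cons_append] at hsplit
            rw [List.foldl_cons, stepA_plain entries url ds htne hlast]
            have hlr : (rest.dropWhile nsp).length ≤ n :=
              le_trans (List.length_dropWhile_le _ _) hlen'
            cases url with
            | none =>
              have hds : ds = [] := hinv rfl
              subst hds
              have := ih (rest.dropWhile nsp) hlr entries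
                (some (c :: rest.takeWhile nsp)) [] h' t' (fun hc => by cases hc) hE
              rw [this]
              have : pvEmit1 entries none [] ((c :: rest.takeWhile nsp) ++ h') =
                  pvEmit1 entries (some (c :: rest.takeWhile nsp)) [] h' := by
                simp [pvEmit1, pvStepB, hsplit]
              rw [this]
            | some u =>
              have := ih (rest.dropWhile nsp) hlr entries
                (some u) (ds ++ [c :: rest.takeWhile nsp]) h' t' (fun hc => by cases hc) hE
              rw [this]
              have : pvEmit1 entries (some u) ds ((c :: rest.takeWhile nsp) ++ h') =
                  pvEmit1 entries (some u) (ds ++ [c :: rest.takeWhile nsp]) h' := by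
                simp [pvEmit1, hsplit]
              rw [this]

-- ===== VERDICT (by name: the statement is the Claim_ definition above) =====
theorem parse_srcset_spec : Claim_equal_parse_srcset := by
  intro s _
  unfold Spec_parse_srcset
  rcases hE : chunksE s.toList with _ | ⟨h, tl⟩
  · exact absurd hE (chunksE_ne_nil _)
  · have hm := mg s.toList.length s.toList le_rfl [] none [] h tl (fun _ => rfl) hE
    have hA : parse_srcset s =
        pvFlush ((PySem.Chars.split₀ s.toList).foldl pvStepA ([], none, [])) := rfl
    rw [hA, hm, alt_eq_chunksE, hE, List.foldl_cons]
    rfl
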